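-- pv_equiv track=rewrite | github.com/Zelong-Chen/Data-Mining-Map-Reduce | Assignment2/task2.py | output_sol
-- ===== SOURCE A (Python) =====
-- def output_sol(sol):
--     output = []
--     max_len = max(len(x) for x in sol)
--     for i in range(1, max_len + 1):
--         arr = [x for x in sol if len(x) == i]
--         line = ''
--         for j in arr:
--             line += str(j).replace(',)', ')') + ','
--         output.append(line)
--     return output
-- ===== SOURCE B (Python) =====
-- def output_sol(sol):
--     # single-pass scatter by length instead of one filtering pass per length
--     max_len = max(len(x) for x in sol)
--     lines = [''] * max_len
--     for x in sol:
--         if x: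
--             lines[len(x) - 1] += '(' + ', '.join(map(str, x)) + '),'
--     return lines
-- ===== Notes on version B (the rewrite author's own statement) =====
-- stated objective: alternative
-- what changed: A loops over every length 1..max_len and re-filters the whole input once per length; B allocates the result list once and makes a single scatter pass over the input, appending each tuple's formatted text (built directly as '(a, b),' instead of str().replace) to the line indexed by its length; Pre_ only excludes the empty list, on which both raise ValueError via max().
-- outside the precondition, e.g. on output_sol([]): A raises ValueError, B raises ValueError
import Mathlib
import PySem

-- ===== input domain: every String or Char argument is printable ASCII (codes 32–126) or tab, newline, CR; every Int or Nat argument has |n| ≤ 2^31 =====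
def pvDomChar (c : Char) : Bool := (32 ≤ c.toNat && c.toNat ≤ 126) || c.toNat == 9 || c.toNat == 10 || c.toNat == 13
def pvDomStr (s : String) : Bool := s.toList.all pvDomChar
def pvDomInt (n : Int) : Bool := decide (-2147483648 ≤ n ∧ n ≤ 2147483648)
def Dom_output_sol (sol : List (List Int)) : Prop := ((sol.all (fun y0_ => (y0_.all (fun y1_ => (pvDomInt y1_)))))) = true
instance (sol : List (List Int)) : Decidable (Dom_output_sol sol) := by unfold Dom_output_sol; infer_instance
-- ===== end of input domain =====

-- B replaces A's per-length re-filtering of the whole input (one filtering pass for every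
-- length 1..max_len) by a single scatter pass appending each tuple's text to the line
-- indexed by its length.

-- ===== PORT A =====
-- str(j) for a Python tuple of ints (exact tuple repr: "()", "(1,)", "(1, 2)")
def pyStrTuple (x : List Int) : String :=
  match x with
  | [] => "()"
  | [n] => "(" ++ PySem.Int.toStr n ++ ",)"
  | _ => "(" ++ PySem.Str.join ", " (x.map PySem.Int.toStr) ++ ")"

def output_sol (sol : List (List Int)) : List String :=
  match PySem.List.max? (sol.map (fun x => (x.length : Int))) (fun y => y) with
  | none => []   -- Python: ValueError on empty sol; excluded by Pre_output_sol
  | some maxLen =>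
    (PySem.List.pyRange 1 (maxLen + 1)).foldl
      (fun output i =>
        let arr := sol.filter (fun x => (x.length : Int) == i)
        let line := arr.foldl
          (fun line j => line ++ PySem.Str.replace (pyStrTuple j) ",)" ")" ++ ",") ""
        output ++ [line])
      []

-- ===== PORT B =====
def output_sol_alt (sol : List (List Int)) : List String :=
  match PySem.List.max? (sol.map (fun x => (x.length : Int))) (fun y => y) with
  | none => []   -- Python: ValueError on empty sol; excluded by Pre_output_sol
  | some maxLen =>
    sol.foldl
      (fun lines x =>
        if x = [] then lines
        else
          lines.set (x.length - 1)
            (lines.getD (x.length - 1) "" ++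
              ("(" ++ PySem.Str.join ", " (x.map PySem.Int.toStr) ++ "),")))
      (List.replicate maxLen.toNat "")

-- ===== PRECONDITION & SPEC =====
-- Python A raises ValueError (max() of an empty sequence) on sol = []; that is all Pre_ excludes.
def Pre_output_sol (sol : List (List Int)) : Prop := sol ≠ []
instance (sol : List (List Int)) : Decidable (Pre_output_sol sol) := by
  unfold Pre_output_sol; infer_instance
def pvWitness_output_sol : List (List Int) := [[1], [2, 3]]
def Spec_output_sol (sol : List (List Int)) (out : List String) : Prop := out = output_sol_alt sol
instance (sol : List (List Int)) (out : List String) : Decidable (Spec_output_sol sol out) := by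
  unfold Spec_output_sol; infer_instance

-- ===== CLAIM (what is proved, stated in full; the proofs are below) =====
def Claim_equal_output_sol : Prop :=
  ∀ (sol : List (List Int)), Dom_output_sol sol → Pre_output_sol sol →
    Spec_output_sol sol (output_sol sol)

-- ===== LEMMAS AND PROOFS =====

def qOK : List Char → Bool
  | [] => true
  | c :: t => ((c != ',') || (t.head? == some ' ')) && qOK t

lemma qOK_tail (c : Char) (t : List Char) (h : qOK (c :: t) = true) : qOK t = true := by
  simp [qOK] at h; exact h.2

lemma qOK_not_infix : ∀ (l : List Char), qOK l = true → ¬ ([',', ')'] <:+: l) := by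
  intro l
  induction l with
  | nil => intro _ h; exact absurd (List.eq_nil_of_infix_nil h) (by simp)
  | cons c t ih =>
    intro hq hinf
    rcases (List.infix_cons_iff).1 hinf with hpre | hinf'
    · rcases List.cons_prefix_cons.1 hpre with ⟨hc, hpre'⟩
      rcases hpre' with ⟨s, hs⟩
      subst hc
      simp [qOK, ← hs] at hq
    · exact ih (qOK_tail _ _ hq) hinf'

lemma qOK_append : ∀ (a b : List Char), qOK a = true → qOK b = true →
    a.getLast? ≠ some ',' → qOK (a ++ b) = true := by
  intro a
  induction a with
  | nil => intro b _ hb _; simpa using hb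
  | cons c t ih =>
    intro b ha hb hlast
    cases t with
    | nil =>
      have hc : c ≠ ',' := by simpa using hlast
      simp [qOK, hc, hb]
    | cons d t' =>
      have h1 := ih b (qOK_tail _ _ ha) hb (by simpa [List.getLast?_cons_cons] using hlast)
      simp only [List.cons_append, qOK, List.head?_cons, Bool.and_eq_true] at ha h1 ⊢
      exact ⟨ha.1, h1⟩

lemma qOK_no_comma : ∀ (a : List Char), (∀ c ∈ a, c ≠ ',') → qOK a = true := by
  intro a
  induction a with
  | nil => intro _; rfl
  | cons c t ih =>
    intro h
    have hc : c ≠ ',' := h c (by simp)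
    simp [qOK, ih (fun d hd => h d (by simp [hd])), hc]

lemma no_comma_getLast (a : List Char) (h : ∀ c ∈ a, c ≠ ',') : a.getLast? ≠ some ',' := by
  intro hl
  exact h ',' (List.mem_of_getLast? hl) rfl

lemma qOK_join : ∀ (ls : List (List Char)), (∀ s ∈ ls, ∀ c ∈ s, c ≠ ',') →
    qOK (PySem.Chars.join [',', ' '] ls) = true ∧
      (PySem.Chars.join [',', ' '] ls).getLast? ≠ some ',' := by
  intro ls
  induction ls with
  | nil => intro _; simp [PySem.Chars.join_nil, qOK]
  | cons a rest ih =>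
    intro h
    have ha : ∀ c ∈ a, c ≠ ',' := h a (by simp)
    cases rest with
    | nil =>
      rw [PySem.Chars.join_singleton]
      exact ⟨qOK_no_comma a ha, no_comma_getLast a ha⟩
    | cons b t =>
      have ih' := ih (fun s hs => h s (by simp [hs]))
      rw [PySem.Chars.join_cons_cons]
      set J := PySem.Chars.join [',', ' '] (b :: t) with hJ
      have hq2 : qOK (',' :: ' ' :: J) = true := by
        simp only [qOK, List.head?_cons, Bool.and_eq_true]
        refine ⟨by simp, by simp, ih'.1⟩
      have hlast2 : ([',', ' '] ++ J).getLast? ≠ some ',' := by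
        cases hc : J with
        | nil => simp
        | cons j js =>
          rw [List.getLast?_append_of_ne_nil _ (by simp)]
          rw [hc] at ih'
          exact ih'.2
      constructor
      · rw [List.append_assoc]
        exact qOK_append a ([',', ' '] ++ J) (qOK_no_comma a ha)
          (by simpa using hq2) (no_comma_getLast a ha)
      · rw [List.append_assoc, List.getLast?_append_of_ne_nil _ (by simp)]
        exact hlast2


lemma toDigitsCore_mem : ∀ (fuel n : Nat) (acc : List Char) (c : Char),
    c ∈ Nat.toDigitsCore 10 fuel n acc → c ∈ acc ∨ ∃ d, d < 10 ∧ c = Nat.digitChar d := by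
  intro fuel
  induction fuel with
  | zero => intro n acc c h; simp [Nat.toDigitsCore] at h; exact Or.inl h
  | succ f ih =>
    intro n acc c h
    simp only [Nat.toDigitsCore] at h
    by_cases hd : n / 10 = 0
    · simp [hd] at h
      rcases h with h | h
      · exact Or.inr ⟨n % 10, Nat.mod_lt _ (by norm_num), h⟩
      · exact Or.inl h
    · simp [hd] at h
      rcases ih _ _ _ h with hmem | hdig
      · rcases List.mem_cons.1 hmem with rfl | hacc
        · exact Or.inr ⟨n % 10, Nat.mod_lt _ (by norm_num), rfl⟩
        · exact Or.inl hacc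
      · exact Or.inr hdig

lemma toChars_no_comma (n : Int) : ∀ c ∈ PySem.Int.toChars n, c ≠ ',' := by
  intro c hc
  unfold PySem.Int.toChars at hc
  have key : ∀ m : Nat, c ∈ Nat.toDigits 10 m → c ≠ ',' := by
    intro m hm
    rcases toDigitsCore_mem _ _ _ _ hm with h | ⟨d, hd, rfl⟩
    · simp at h
    · interval_cases d <;> simp [Nat.digitChar]
  split at hc
  · rcases List.mem_cons.1 hc with rfl | hc'
    · simp
    · exact key _ hc'
  · exact key _ hc

lemma go_noocc (new : List Char) : ∀ (fuel : Nat) (l acc : List Char), l.length ≤ fuel →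
    ¬ ([',', ')'] <:+: l) →
    PySem.Chars.replace.go [',', ')'] new fuel l acc = acc.reverse ++ l := by
  intro fuel
  induction fuel with
  | zero =>
    intro l acc hl _
    have : l = [] := List.eq_nil_of_length_eq_zero (Nat.le_zero.1 hl)
    subst this
    simp [PySem.Chars.replace.go]
  | succ f ih =>
    intro l acc hl hocc
    cases l with
    | nil => simp [PySem.Chars.replace.go]
    | cons c t =>
      have hpre : [',', ')'].isPrefixOf (c :: t) = false := by
        apply Bool.eq_false_iff.2
        intro hb
        exact hocc ((List.isPrefixOf_iff_prefix.1 hb).isInfix)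
      rw [PySem.Chars.replace.go, hpre]
      simp only [Bool.false_eq_true, if_false]
      rw [ih t (c :: acc) (by simpa using Nat.le_of_succ_le_succ (by simpa using hl))
        (fun hi => hocc (hi.trans (List.suffix_cons c t).isInfix))]
      simp

lemma go_end : ∀ (p : List Char) (fuel : Nat) (acc : List Char), p.length + 2 ≤ fuel →
    (∀ c ∈ p, c ≠ ',') →
    PySem.Chars.replace.go [',', ')'] [')'] fuel (p ++ [',', ')']) acc =
      acc.reverse ++ p ++ [')'] := by
  intro p
  induction p with
  | nil =>
    intro fuel acc hf _
    obtain ⟨f, rfl⟩ : ∃ f, fuel = f + 1 := ⟨fuel - 1, by omega⟩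
    rw [List.nil_append, PySem.Chars.replace.go]
    have hpre : [',', ')'].isPrefixOf [',', ')'] = true := by decide
    rw [hpre]
    simp only [if_true]
    obtain ⟨f', rfl⟩ : ∃ f', f = f' + 1 := ⟨f - 1, by omega⟩
    simp [PySem.Chars.replace.go]
  | cons c p' ih =>
    intro fuel acc hf hc
    obtain ⟨f, rfl⟩ : ∃ f, fuel = f + 1 := ⟨fuel - 1, by omega⟩
    have hcc : c ≠ ',' := hc c (by simp)
    have hpre : [',', ')'].isPrefixOf (c :: (p' ++ [',', ')'])) = false := by
      simp [List.isPrefixOf]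
      intro h; exact absurd h.symm hcc
    rw [List.cons_append, PySem.Chars.replace.go, hpre]
    simp only [Bool.false_eq_true, if_false]
    rw [ih f (c :: acc) (by simpa using hf) (fun d hd => hc d (by simp [hd]))]
    simp

def fmtT (x : List Int) : String := "(" ++ PySem.Str.join ", " (x.map PySem.Int.toStr) ++ "),"

lemma str_ext (s t : String) (h : s.toList = t.toList) : s = t := by
  calc s = String.ofList s.toList := (String.ofList_toList).symm
    _ = String.ofList t.toList := by rw [h]
    _ = t := String.ofList_toList

lemma replace_fmt (j : List Int) (hj : j ≠ []) :
    PySem.Str.replace (pyStrTuple j) ",)" ")" ++ "," = fmtT j := by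
  match j with
  | [] => exact absurd rfl hj
  | [n] =>
    apply str_ext
    have hs : (pyStrTuple [n]).toList = ('(' :: PySem.Int.toChars n) ++ [',', ')'] := by
      simp [pyStrTuple, String.toList_append, PySem.Int.toList_toStr]
    rw [PySem.Str.replace]
    simp only [String.toList_append, String.toList_ofList, hs]
    rw [show (",)" : String).toList = [',', ')'] from rfl,
        show (")" : String).toList = [')'] from rfl]
    rw [PySem.Chars.replace]
    simp only [List.isEmpty_cons]
    rw [go_end ('(' :: PySem.Int.toChars n) _ []
      (by simp) (by
        intro c hc
        rcases List.mem_cons.1 hc with rfl | hc'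
        · simp
        · exact toChars_no_comma n c hc')]
    simp [fmtT, String.toList_append, PySem.Int.toList_toStr, PySem.Str.toList_join,
      PySem.Chars.join_singleton]
  | a :: b :: t =>
    apply str_ext
    have hJ : (PySem.Str.join ", " ((a :: b :: t).map PySem.Int.toStr)).toList =
        PySem.Chars.join [',', ' '] (((a :: b :: t).map PySem.Int.toChars)) := by
      rw [PySem.Str.toList_join, List.map_map,
        show String.toList ∘ PySem.Int.toStr = PySem.Int.toChars from funext PySem.Int.toList_toStr,
        show (", " : String).toList = [',', ' '] from rfl]
    set L := (a :: b :: t).map PySem.Int.toChars with hL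
    have hnc : ∀ s ∈ L, ∀ c ∈ s, c ≠ ',' := by
      intro s hs
      rw [hL] at hs
      rcases List.mem_map.1 hs with ⟨n, _, rfl⟩
      exact toChars_no_comma n
    have hq := qOK_join L hnc
    have hcs : (pyStrTuple (a :: b :: t)).toList =
        '(' :: (PySem.Chars.join [',', ' '] L ++ [')']) := by
      rw [show pyStrTuple (a :: b :: t) =
            "(" ++ PySem.Str.join ", " ((a :: b :: t).map PySem.Int.toStr) ++ ")" from rfl,
          String.toList_append, String.toList_append, hJ]
      rfl
    have hqcs : qOK ('(' :: (PySem.Chars.join [',', ' '] L ++ [')'])) = true := by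
      simp only [qOK, Bool.and_eq_true]
      refine ⟨by simp, qOK_append _ _ hq.1 (by decide) hq.2⟩
    rw [PySem.Str.replace]
    simp only [String.toList_append, String.toList_ofList, hcs]
    rw [show (",)" : String).toList = [',', ')'] from rfl,
        show (")" : String).toList = [')'] from rfl]
    rw [PySem.Chars.replace]
    simp only [List.isEmpty_cons]
    rw [go_noocc _ _ _ _ (le_refl _) (qOK_not_infix _ hqcs)]
    rw [show fmtT (a :: b :: t) =
          "(" ++ PySem.Str.join ", " ((a :: b :: t).map PySem.Int.toStr) ++ ")," from rfl,
        String.toList_append, String.toList_append, hJ]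
    simp

def lineOf (sol : List (List Int)) (L : Nat) : String :=
  (sol.filter (fun x => x.length == L)).foldl (fun line j => line ++ fmtT j) ""

lemma foldl_append_singleton {α β : Type} (g : α → β) :
    ∀ (l : List α) (init : List β),
      l.foldl (fun out i => out ++ [g i]) init = init ++ l.map g := by
  intro l
  induction l with
  | nil => simp
  | cons a t ih => intro init; simp [ih]

lemma outA (sol : List (List Int)) (m : Int)
    (hm : PySem.List.max? (sol.map (fun x => (x.length : Int))) (fun y => y) = some m) :
    output_sol sol = (List.range m.toNat).map (fun k => lineOf sol (k + 1)) := by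
  have hm0 : 0 ≤ m := by
    rcases List.mem_map.1 (PySem.List.max?_mem hm) with ⟨x, _, rfl⟩
    positivity
  simp only [output_sol, hm]
  rw [PySem.List.pyRange_one]
  have : (m + 1 - 1).toNat = m.toNat := by omega
  rw [this, foldl_append_singleton, List.nil_append, List.map_map]
  apply List.map_congr_left
  intro k hk
  simp only [Function.comp_apply]
  have hfilter : sol.filter (fun x => (x.length : Int) == 1 + (k : Int)) =
      sol.filter (fun x => x.length == k + 1) := by
    apply List.filter_congr
    intro x _
    rw [Bool.eq_iff_iff]
    simp only [beq_iff_eq]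
    omega
  rw [hfilter]
  unfold lineOf
  apply PySem.List.foldl_congr_mem
  intro acc x hx
  have hlen : x.length = k + 1 := by
    have := List.of_mem_filter hx
    simpa using this
  have hne : x ≠ [] := by
    intro h; rw [h] at hlen; simp at hlen
  rw [String.append_assoc, replace_fmt x hne]

lemma set_map_range {β : Type} (f : Nat → β) (n k : Nat) (v : β) (_hk : k < n) :
    ((List.range n).map f).set k v =
      (List.range n).map (fun i => if i = k then v else f i) := by
  apply List.ext_getElem
  · simp
  · intro i h1 h2
    simp only [List.getElem_set, List.getElem_map, List.getElem_range]
    by_cases hik : i = k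
    · simp [hik]
    · rw [if_neg (fun hki => absurd hki.symm hik), if_neg hik]

lemma lineOf_append_skip (sol : List (List Int)) (x : List Int) (L : Nat)
    (h : x.length ≠ L) : lineOf (sol ++ [x]) L = lineOf sol L := by
  unfold lineOf
  rw [List.filter_append]
  have hb : (x.length == L) = false := by simp [h]
  have : List.filter (fun y => y.length == L) [x] = [] := by
    simp [hb]
  rw [this, List.append_nil]

lemma lineOf_append_hit (sol : List (List Int)) (x : List Int) (L : Nat)
    (h : x.length = L) : lineOf (sol ++ [x]) L = lineOf sol L ++ fmtT x := by
  unfold lineOf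
  rw [List.filter_append]
  have hb : (x.length == L) = true := by simp [h]
  have : List.filter (fun y => y.length == L) [x] = [x] := by
    simp [hb]
  rw [this, List.foldl_append]
  rfl

lemma scatter (m : Nat) : ∀ (sol : List (List Int)), (∀ x ∈ sol, x.length ≤ m) →
    sol.foldl
      (fun lines x =>
        if x = [] then lines
        else
          lines.set (x.length - 1)
            (lines.getD (x.length - 1) "" ++
              ("(" ++ PySem.Str.join ", " (x.map PySem.Int.toStr) ++ "),")))
      (List.replicate m "") =
      (List.range m).map (fun k => lineOf sol (k + 1)) := by
  intro sol
  induction sol using List.reverseRecOn with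
  | nil =>
    intro _
    apply List.ext_getElem
    · simp
    · intro i h1 h2
      simp [lineOf, List.filter]
  | append_singleton sol x ih =>
    intro hb
    rw [List.foldl_append]
    rw [ih (fun y hy => hb y (by simp [hy]))]
    simp only [List.foldl_cons, List.foldl_nil]
    by_cases hx : x = []
    · subst hx
      simp only [if_true]
      apply List.map_congr_left
      intro k _
      exact (lineOf_append_skip sol [] (k + 1) (by simp)).symm
    · simp only [hx, if_false]
      have hxlen : 1 ≤ x.length := by
        cases x with
        | nil => exact absurd rfl hx
        | cons _ _ => simp
      have hlt : x.length - 1 < m := by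
        have := hb x (by simp)
        omega
      have hgetD : (((List.range m).map (fun k => lineOf sol (k + 1))).getD (x.length - 1) "")
          = lineOf sol x.length := by
        rw [List.getD_eq_getElem?_getD]
        rw [List.getElem?_map]
        simp only [List.getElem?_range hlt]
        simp only [Option.map_some, Option.getD_some]
        congr 1
        omega
      rw [hgetD, set_map_range _ _ _ _ hlt]
      apply List.map_congr_left
      intro k _
      by_cases hk : k = x.length - 1
      · subst hk
        simp only [if_true]
        rw [lineOf_append_hit sol x (x.length - 1 + 1) (by omega)]
        have : x.length - 1 + 1 = x.length := by omega
        rw [this]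
        rfl
      · simp only [hk, if_false]
        exact (lineOf_append_skip sol x (k + 1) (by omega)).symm

lemma outB (sol : List (List Int)) (m : Int)
    (hm : PySem.List.max? (sol.map (fun x => (x.length : Int))) (fun y => y) = some m) :
    output_sol_alt sol = (List.range m.toNat).map (fun k => lineOf sol (k + 1)) := by
  simp only [output_sol_alt, hm]
  apply scatter
  intro x hx
  have := PySem.List.max?_isMax hm ((x.length : Int)) (List.mem_map_of_mem hx)
  omega

-- ===== VERDICT (by name: the statement is the Claim_ definition above) =====
theorem output_sol_spec : Claim_equal_output_sol := by
  intro sol _ _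
  unfold Spec_output_sol
  cases hm : PySem.List.max? (sol.map (fun x => (x.length : Int))) (fun y => y) with
  | none => simp [output_sol, output_sol_alt, hm]
  | some m => rw [outA sol m hm, outB sol m hm]
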